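-- pv_equiv track=rewrite | github.com/captain-jackked/quest | src/leet_path/helper/ui_utils.py | _append_tags
-- ===== SOURCE A (Python) =====
-- def _append_tags(existing_tags, tag_cols, new_tags):
--     existing_tags = existing_tags.copy()
--     if tag_cols:
--         tag_cols = [x for x in tag_cols if x in existing_tags]
--         for col in tag_cols:
--             old_tags = existing_tags.get(col, {})
--             existing_tags[col] = {**old_tags, **new_tags}
--     return existing_tags
-- ===== SOURCE B (Python) =====
-- def _append_tags(existing_tags, tag_cols, new_tags):
--     cols = set(tag_cols or [])
--     return {k: ({**v, **new_tags} if k in cols else v)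
--             for k, v in existing_tags.items()}
-- ===== Notes on version B (the rewrite author's own statement) =====
-- stated objective: simpler
-- what changed: Instead of copying the dict and mutating the entries named by a filtered tag_cols list, B builds a set of column names once and produces the result in a single dict comprehension over existing_tags.items(), merging new_tags into a value exactly when its key is in the set.
import Mathlib
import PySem

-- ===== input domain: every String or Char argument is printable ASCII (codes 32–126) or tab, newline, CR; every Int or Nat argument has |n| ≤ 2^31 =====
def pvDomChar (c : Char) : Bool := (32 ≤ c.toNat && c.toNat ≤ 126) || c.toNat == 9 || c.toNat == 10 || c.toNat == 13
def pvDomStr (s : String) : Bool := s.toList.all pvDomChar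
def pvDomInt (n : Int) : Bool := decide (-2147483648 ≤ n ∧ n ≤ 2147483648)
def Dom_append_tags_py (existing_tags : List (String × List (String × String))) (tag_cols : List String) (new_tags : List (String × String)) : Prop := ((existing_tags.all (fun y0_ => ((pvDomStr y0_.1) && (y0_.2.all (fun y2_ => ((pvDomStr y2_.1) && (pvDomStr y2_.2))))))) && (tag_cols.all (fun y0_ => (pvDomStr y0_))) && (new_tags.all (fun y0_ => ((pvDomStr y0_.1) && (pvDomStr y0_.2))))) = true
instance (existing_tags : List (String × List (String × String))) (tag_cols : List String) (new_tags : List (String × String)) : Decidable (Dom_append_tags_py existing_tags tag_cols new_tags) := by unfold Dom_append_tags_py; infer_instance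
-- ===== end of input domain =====

-- B replaces A's copy-then-mutate loop over a filtered tag_cols list by one dict
-- comprehension over existing_tags with a set membership test (objective: simpler).
-- Equivalence of the RETURN value is proved; neither version mutates its arguments.

-- ===== PORT A =====
-- the Python expression {**old, **new_tags} (dict merge), used verbatim by both Pythons
def pvMergeDicts (old : List (String × String)) (new_tags : List (String × String)) : List (String × String) :=
  ((PySem.Dict.mk old).update new_tags).items

def append_tags_py (existing_tags : List (String × List (String × String))) (tag_cols : List String) (new_tags : List (String × String)) : List (String × List (String × String)) :=
  let existing := PySem.Dict.mk existing_tags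
  if !tag_cols.isEmpty then
    let cols := tag_cols.filter (fun x => existing.contains x)
    (cols.foldl (fun d col =>
        let old_tags := d.getD col []
        d.insert col (pvMergeDicts old_tags new_tags)) existing).items
  else
    existing.items

-- ===== PORT B =====
def append_tags_py_alt (existing_tags : List (String × List (String × String))) (tag_cols : List String) (new_tags : List (String × String)) : List (String × List (String × String)) :=
  let cols := PySem.Set.ofList tag_cols
  existing_tags.map (fun kv => (kv.1, if cols.contains kv.1 then pvMergeDicts kv.2 new_tags else kv.2))

-- ===== PRECONDITION & SPEC =====
-- Pre_ excludes association lists whose top-level keys repeat: duplicate keys do not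
-- represent any Python dict, and the ports' treatment of the repeated entries is accidental.
def Pre_append_tags_py (existing_tags : List (String × List (String × String))) (tag_cols : List String) (new_tags : List (String × String)) : Prop :=
  (existing_tags.map Prod.fst).Nodup

instance (existing_tags : List (String × List (String × String))) (tag_cols : List String) (new_tags : List (String × String)) : Decidable (Pre_append_tags_py existing_tags tag_cols new_tags) := by unfold Pre_append_tags_py; infer_instance

def pvWitness_append_tags_py : (List (String × List (String × String))) × List String × (List (String × String)) :=
  ([("a", [("t", "1")]), ("b", [])], ["a", "c"], [("x", "y")])

def Spec_append_tags_py (existing_tags : List (String × List (String × String))) (tag_cols : List String) (new_tags : List (String × String)) (out : List (String × List (String × String))) : Prop := out = append_tags_py_alt existing_tags tag_cols new_tags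
instance (existing_tags : List (String × List (String × String))) (tag_cols : List String) (new_tags : List (String × String)) (out : List (String × List (String × String))) : Decidable (Spec_append_tags_py existing_tags tag_cols new_tags out) := by unfold Spec_append_tags_py; infer_instance

-- ===== CLAIM (what is proved, stated in full; the proofs are below) =====
def Claim_equal_append_tags_py : Prop := ∀ (existing_tags : List (String × List (String × String))) (tag_cols : List String) (new_tags : List (String × String)), Dom_append_tags_py existing_tags tag_cols new_tags → Pre_append_tags_py existing_tags tag_cols new_tags → Spec_append_tags_py existing_tags tag_cols new_tags (append_tags_py existing_tags tag_cols new_tags)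

-- ===== LEMMAS AND PROOFS =====

-- last value bound to key k in the pair list n, defaulting to x
def pvLastV : List (String × String) → String → String → String
  | [], _, x => x
  | p :: t, k, x => pvLastV t k (if p.1 == k then p.2 else x)

theorem pvLastV_of_not_hasKey (n : List (String × String)) (k : String) (x : String)
    (h : n.any (fun q => q.1 == k) = false) : pvLastV n k x = x := by
  induction n generalizing x with
  | nil => rfl
  | cons p t ih =>
    simp only [List.any_cons, Bool.or_eq_false_iff] at h
    show pvLastV t k (if p.1 == k then p.2 else x) = x
    rw [show (if p.1 == k then p.2 else x) = x from by simp [h.1]]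
    exact ih x h.2

theorem pv_assoc_unique {α β : Type} [DecidableEq α] (l : List (α × β))
    (h : (l.map Prod.fst).Nodup) {k : α} {v w : β}
    (h1 : (k, v) ∈ l) (h2 : (k, w) ∈ l) : v = w := by
  induction l with
  | nil => cases h1
  | cons p t ih =>
    rw [List.map_cons] at h
    have hnd := List.nodup_cons.1 h
    rcases List.mem_cons.1 h1 with h1 | h1 <;> rcases List.mem_cons.1 h2 with h2 | h2
    · have : (k, v) = (k, w) := h1.trans h2.symm
      simpa using this
    · exfalso; apply hnd.1
      have hk : p.1 = k := by rw [← h1]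
      rw [hk]; exact List.mem_map.2 ⟨(k, w), h2, rfl⟩
    · exfalso; apply hnd.1
      have hk : p.1 = k := by rw [← h2]
      rw [hk]; exact List.mem_map.2 ⟨(k, v), h1, rfl⟩
    · exact ih hnd.2 h1 h2

theorem pv_contains_update_mono (t : List (String × String)) (d : PySem.Dict String String)
    (k : String) (h : d.contains k = true) : (d.update t).contains k = true := by
  induction t generalizing d with
  | nil => exact h
  | cons p r ih =>
    show ((d.insert p.1 p.2).update r).contains k = true
    exact ih _ (by rw [PySem.Dict.contains_insert]; simp [h])

theorem pv_contains_update_of_mem (n : List (String × String)) (d : PySem.Dict String String)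
    (k : String) (h : k ∈ n.map Prod.fst) : (d.update n).contains k = true := by
  induction n generalizing d with
  | nil => cases h
  | cons p r ih =>
    show ((d.insert p.1 p.2).update r).contains k = true
    rcases List.mem_cons.1 h with h | h
    · exact pv_contains_update_mono r _ k (h ▸ PySem.Dict.contains_insert_self _ _ _)
    · exact ih _ h

-- entries whose key is untouched by the update survive unchanged
theorem pv_mem_update_untouched (t : List (String × String)) (d : PySem.Dict String String)
    (p : String × String) (hp : p ∈ (d.update t).items)
    (h : t.any (fun q => q.1 == p.1) = false) : p ∈ d.items := by
  induction t generalizing d with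
  | nil => exact hp
  | cons q r ih =>
    simp only [List.any_cons, Bool.or_eq_false_iff] at h
    have : p ∈ (d.insert q.1 q.2).items := ih _ hp h.2
    rcases (PySem.Dict.mem_items_insert _ _ _ _).1 this with h1 | h1
    · exfalso; have hh := h.1; rw [h1] at hh; simp at hh
    · exact h1.1

-- an entry whose key occurs in the update list ends with the key's last value
theorem pv_update_val_last (n : List (String × String)) (d : PySem.Dict String String)
    (p : String × String) (w : String) (hp : p ∈ (d.update n).items)
    (h : n.any (fun q => q.1 == p.1) = true) : p.2 = pvLastV n p.1 w := by
  induction n generalizing d w with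
  | nil => simp at h
  | cons q t ih =>
    simp only [List.any_cons, Bool.or_eq_true_iff] at h
    by_cases ht : t.any (fun q => q.1 == p.1) = true
    · exact ih _ _ hp ht
    · have hq : (q.1 == p.1) = true := by
        rcases h with h | h
        · exact h
        · exact absurd h ht
      have hk : p.1 = q.1 := (beq_iff_eq.1 hq).symm
      have hmem : p ∈ (d.insert q.1 q.2).items :=
        pv_mem_update_untouched t _ p hp (eq_false_of_ne_true ht)
      have hpv : p = (q.1, q.2) := by
        rcases (PySem.Dict.mem_items_insert _ _ _ _).1 hmem with h1 | h1
        · exact h1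
        · exact absurd hk h1.2
      show p.2 = pvLastV t p.1 (if q.1 == p.1 then q.2 else w)
      rw [pvLastV_of_not_hasKey t p.1 _ (eq_false_of_ne_true ht), if_pos hq]
      exact congrArg Prod.snd hpv

-- closed form of dict.update when every updated key is already present
theorem pv_items_update_of_contains (n : List (String × String)) (d : PySem.Dict String String)
    (h : ∀ p ∈ n, d.contains p.1 = true) :
    (d.update n).items = d.items.map
      (fun p => if n.any (fun q => q.1 == p.1) then (p.1, pvLastV n p.1 p.2) else p) := by
  induction n generalizing d with
  | nil => simp [PySem.Dict.update]
  | cons q t ih =>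
    have hq : d.contains q.1 = true := h q (List.mem_cons_self ..)
    have ht : ∀ p ∈ t, (d.insert q.1 q.2).contains p.1 = true := fun p hp => by
      rw [PySem.Dict.contains_insert]; simp [h p (List.mem_cons_of_mem _ hp)]
    show ((d.insert q.1 q.2).update t).items = _
    rw [ih _ ht, PySem.Dict.items_insert_of_contains _ _ hq, List.map_map]
    apply List.map_congr_left
    intro p _
    show (if t.any (fun r => r.1 == (if p.1 == q.1 then (q.1, q.2) else p).1) then _ else _) = _
    by_cases hpk : p.1 = q.1
    · simp only [hpk, beq_self_eq_true, if_pos]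
      by_cases htk : t.any (fun r => r.1 == q.1) = true
      · simp only [htk, List.any_cons, beq_self_eq_true, Bool.true_or, if_pos]
        show (q.1, pvLastV t q.1 q.2) = (q.1, pvLastV t q.1 (if q.1 == q.1 then q.2 else p.2))
        simp
      · simp only [htk, Bool.false_eq_true, if_false, List.any_cons, beq_self_eq_true,
          Bool.true_or, if_pos]
        show (q.1, q.2) = (q.1, pvLastV t q.1 (if q.1 == q.1 then q.2 else p.2))
        rw [pvLastV_of_not_hasKey t q.1 _ (eq_false_of_ne_true htk)]
        simp
    · have hbq : (p.1 == q.1) = false := by simp [hpk]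
      simp only [hbq, Bool.false_eq_true, if_false, List.any_cons]
      have hqb : (q.1 == p.1) = false := by simp [Ne.symm hpk]
      simp only [hqb, Bool.false_or]
      by_cases htk : t.any (fun r => r.1 == p.1) = true
      · simp only [htk, if_pos]
        show (p.1, pvLastV t p.1 p.2) = (p.1, pvLastV t p.1 (if q.1 == p.1 then q.2 else p.2))
        rw [hqb]; simp
      · simp [htk]

theorem pv_update_update (d : PySem.Dict String String) (n : List (String × String)) :
    (d.update n).update n = d.update n := by
  apply PySem.Dict.ext
  rw [pv_items_update_of_contains n (d.update n)
    (fun p hp => pv_contains_update_of_mem n d p.1 (List.mem_map.2 ⟨p, hp, rfl⟩))]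
  have : ∀ p ∈ (d.update n).items,
      (if n.any (fun q => q.1 == p.1) then (p.1, pvLastV n p.1 p.2) else p) = p := by
    intro p hp
    by_cases h : n.any (fun q => q.1 == p.1) = true
    · rw [if_pos h, ← pv_update_val_last n d p p.2 hp h]
    · simp [h]
  rw [List.map_congr_left this]
  simp

theorem pv_merge_idem (v n : List (String × String)) :
    pvMergeDicts (pvMergeDicts v n) n = pvMergeDicts v n := by
  show (((PySem.Dict.mk ((PySem.Dict.mk v).update n).items).update n)).items = _
  exact congrArg PySem.Dict.items (pv_update_update (PySem.Dict.mk v) n)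

-- the list A's loop state represents after the columns satisfying P have been processed
def pvApplF (n : List (String × String)) (P : String → Bool)
    (ets : List (String × List (String × String))) : List (String × List (String × String)) :=
  ets.map (fun kv => (kv.1, if P kv.1 then pvMergeDicts kv.2 n else kv.2))

theorem pv_main_inv (n : List (String × String)) (cols : List String) :
    ∀ (ets : List (String × List (String × String))) (P : String → Bool),
    (ets.map Prod.fst).Nodup → (∀ c ∈ cols, c ∈ ets.map Prod.fst) →
    cols.foldl (fun d col => d.insert col (pvMergeDicts (d.getD col []) n))
        (PySem.Dict.mk (pvApplF n P ets))
      = PySem.Dict.mk (pvApplF n (fun k => P k || cols.contains k) ets) := by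
  induction cols with
  | nil =>
    intro ets P _ _
    simp [pvApplF, List.foldl]
  | cons c rest ih =>
    intro ets P hnd hmem
    have hc : c ∈ ets.map Prod.fst := hmem c (List.mem_cons_self ..)
    obtain ⟨kv, hkv, hkv1⟩ := List.mem_map.1 hc
    have hex : ∃ v, (c, v) ∈ ets := by
      refine ⟨kv.2, ?_⟩
      rw [← hkv1]
      exact (show (kv.1, kv.2) = kv from rfl) ▸ hkv
    obtain ⟨vc, hvc⟩ := hex
    have hkeys : (PySem.Dict.mk (pvApplF n P ets)).keys = ets.map Prod.fst := by
      simp [pvApplF, PySem.Dict.keys]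
    have hgetD : (PySem.Dict.mk (pvApplF n P ets)).getD c [] =
        (if P c then pvMergeDicts vc n else vc) := by
      apply PySem.Dict.getD_of_mem_items
      · show (c, _) ∈ pvApplF n P ets
        exact List.mem_map.2 ⟨(c, vc), hvc, rfl⟩
      · rw [hkeys]; exact hnd
    have hcont : (PySem.Dict.mk (pvApplF n P ets)).contains c = true := by
      rw [PySem.Dict.contains_eq_decide_mem_keys, hkeys]; simpa using hc
    have hmerge : pvMergeDicts ((PySem.Dict.mk (pvApplF n P ets)).getD c []) n
        = pvMergeDicts vc n := by
      rw [hgetD]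
      by_cases hP : P c = true
      · rw [if_pos hP, pv_merge_idem]
      · simp [hP]
    have hstep : (PySem.Dict.mk (pvApplF n P ets)).insert c
          (pvMergeDicts ((PySem.Dict.mk (pvApplF n P ets)).getD c []) n)
        = PySem.Dict.mk (pvApplF n (fun k => P k || (k == c)) ets) := by
      apply PySem.Dict.ext
      rw [hmerge]
      show ((PySem.Dict.mk (pvApplF n P ets)).insert c (pvMergeDicts vc n)).items
        = pvApplF n (fun k => P k || (k == c)) ets
      rw [PySem.Dict.items_insert_of_contains _ _ hcont]
      show (pvApplF n P ets).map _ = _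
      unfold pvApplF
      rw [List.map_map]
      apply List.map_congr_left
      intro q hq
      by_cases hqc : q.1 = c
      · have hq2 : q.2 = vc := pv_assoc_unique ets hnd (hqc ▸ (Prod.mk.eta ▸ hq)) hvc
        simp only [Function.comp_apply, hqc, beq_self_eq_true, if_pos, Bool.or_true, hq2]
      · have hb : (q.1 == c) = false := by simp [hqc]
        simp only [Function.comp_apply, hb, Bool.or_false]
        by_cases hP : P q.1 = true <;> simp [hP, hb]
    show List.foldl _ _ (c :: rest) = _
    rw [List.foldl_cons, hstep, ih ets (fun k => P k || (k == c)) hnd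
      (fun d hd => hmem d (List.mem_cons_of_mem _ hd))]
    have : ∀ kv ∈ ets, ((P kv.1 || (kv.1 == c)) || rest.contains kv.1)
        = (P kv.1 || (c :: rest).contains kv.1) := by
      intro kv _
      show _ = (P kv.1 || List.contains (c :: rest) kv.1)
      have : List.contains (c :: rest) kv.1 = ((kv.1 == c) || rest.contains kv.1) := by
        by_cases hx : kv.1 = c <;> simp [List.contains_cons, hx]
      rw [this, Bool.or_assoc]
    unfold pvApplF
    exact congrArg PySem.Dict.mk (List.map_congr_left (fun kv hkv => by simp only [this kv hkv]))

theorem pv_B_eq_applF (ets : List (String × List (String × String))) (tag_cols : List String)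
    (n : List (String × String)) :
    append_tags_py_alt ets tag_cols n
      = pvApplF n (fun k => (PySem.Set.ofList tag_cols).contains k) ets := rfl

-- ===== VERDICT (by name: the statement is the Claim_ definition above) =====
theorem append_tags_py_spec : Claim_equal_append_tags_py := by
  intro ets tag_cols n _ hpre
  unfold Spec_append_tags_py append_tags_py
  by_cases hE : tag_cols.isEmpty = true
  · simp only [hE, Bool.not_true, Bool.false_eq_true, if_false]
    have : tag_cols = [] := List.isEmpty_iff.1 hE
    subst this
    show ets = append_tags_py_alt ets [] n
    rw [pv_B_eq_applF]
    unfold pvApplF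
    have : ∀ kv ∈ ets, ((kv.1,
        if (PySem.Set.ofList ([] : List String)).contains kv.1 then pvMergeDicts kv.2 n else kv.2))
        = kv := by
      intro kv _
      rw [show (PySem.Set.ofList ([] : List String)).contains kv.1 = false from rfl]
      simp
    rw [List.map_congr_left this]
    simp
  · simp only [hE, Bool.not_false, if_true]
    have hstart : PySem.Dict.mk ets = PySem.Dict.mk (pvApplF n (fun _ => false) ets) := by
      unfold pvApplF
      refine congrArg PySem.Dict.mk ?_
      rw [List.map_congr_left (fun kv _ => by simp : ∀ kv ∈ ets,
        ((kv.1, if false then pvMergeDicts kv.2 n else kv.2) : String × List (String × String)) = kv)]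
      simp
    set cols := tag_cols.filter (fun x => (PySem.Dict.mk ets).contains x) with hcols
    have hmemcols : ∀ c ∈ cols, c ∈ ets.map Prod.fst := by
      intro c hcmem
      have := (List.mem_filter.1 hcmem).2
      rw [PySem.Dict.contains_eq_decide_mem_keys] at this
      have : c ∈ (PySem.Dict.mk ets).keys := by simpa using this
      simpa [PySem.Dict.keys] using this
    rw [hstart, pv_main_inv n cols ets (fun _ => false) hpre hmemcols]
    rw [pv_B_eq_applF]
    unfold pvApplF
    show (PySem.Dict.mk _).items = _
    refine List.map_congr_left ?_
    intro kv hkv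
    have hkeymem : kv.1 ∈ ets.map Prod.fst := List.mem_map.2 ⟨kv, hkv, rfl⟩
    have hcontain : (PySem.Dict.mk ets).contains kv.1 = true := by
      rw [PySem.Dict.contains_eq_decide_mem_keys]
      simpa [PySem.Dict.keys] using hkeymem
    have hiff : kv.1 ∈ cols ↔ kv.1 ∈ tag_cols := by
      rw [hcols, List.mem_filter]
      exact ⟨fun h => h.1, fun h => ⟨h, hcontain⟩⟩
    have : (false || cols.contains kv.1) = (PySem.Set.ofList tag_cols).contains kv.1 := by
      rw [Bool.false_or]
      have h1 : cols.contains kv.1 = decide (kv.1 ∈ cols) := by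
        simp [List.contains_iff_mem]
      have h2 : (PySem.Set.ofList tag_cols).contains kv.1
          = decide (kv.1 ∈ PySem.Set.ofList tag_cols) := by
        simp [List.contains_iff_mem]
      rw [h1, h2]
      congr 1
      simp only [eq_iff_iff]
      rw [PySem.Set.mem_ofList]
      exact hiff
    simp only [this]
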